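-- pv_equiv track=rewrite | github.com/akilada/openlews-prototype-v2 | src/lambdas/rag/rag_query_lambda.py | geohash_neighbors_8
-- ===== SOURCE A (Python) =====
-- from typing import Any, Dict, List, Optional
--
-- _BASE32 = "0123456789bcdefghjkmnpqrstuvwxyz"
--
-- _NEIGHBORS = {
--     "right": {
--         "even": "bc01fg45238967deuvhjyznpkmstqrwx",
--         "odd": "p0r21436x8zb9dcf5h7kjnmqesgutwvy",
--     },
--     "left": {
--         "even": "238967debc01fg45kmstqrwxuvhjyznp",
--         "odd": "14365h7k9dcfesgujnmqp0r2twvyx8zb",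
--     },
--     "top": {
--         "even": "p0r21436x8zb9dcf5h7kjnmqesgutwvy",
--         "odd": "bc01fg45238967deuvhjyznpkmstqrwx",
--     },
--     "bottom": {
--         "even": "14365h7k9dcfesgujnmqp0r2twvyx8zb",
--         "odd": "238967debc01fg45kmstqrwxuvhjyznp",
--     },
-- }
--
-- _BORDERS = {
--     "right": {"even": "bcfguvyz", "odd": "prxz"},
--     "left": {"even": "0145hjnp", "odd": "028b"},
--     "top": {"even": "prxz", "odd": "bcfguvyz"},
--     "bottom": {"even": "028b", "odd": "0145hjnp"},
-- }
--
-- def _adjacent(geohash: str, direction: str) -> str: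
--     if not geohash:
--         return ""
--
--     geohash = geohash.lower()
--     last = geohash[-1]
--     parent = geohash[:-1]
--     t = "even" if (len(geohash) % 2 == 0) else "odd"
--
--     if last in _BORDERS[direction][t] and parent:
--         parent = _adjacent(parent, direction)
--
--     idx = _NEIGHBORS[direction][t].find(last)
--     if idx < 0:
--         return ""
--
--     return parent + _BASE32[idx]
--
-- def geohash_neighbors_8(cell: str) -> List[str]:
--     cell = (cell or "").lower()
--     if not cell:
--         return []
--
--     top = _adjacent(cell, "top")
--     bottom = _adjacent(cell, "bottom")
--     right = _adjacent(cell, "right")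
--     left = _adjacent(cell, "left")
--
--     candidates = [
--         cell,
--         top,
--         bottom,
--         right,
--         left,
--         _adjacent(top, "right") if top else "",
--         _adjacent(top, "left") if top else "",
--         _adjacent(bottom, "right") if bottom else "",
--         _adjacent(bottom, "left") if bottom else "",
--     ]
--
--     seen = set()
--     out: List[str] = []
--     for c in candidates:
--         if c and len(c) == len(cell) and c not in seen:
--             seen.add(c)
--             out.append(c)
--     return out
-- ===== SOURCE B (Python) =====
-- from typing import List
--
-- _BASE32 = "0123456789bcdefghjkmnpqrstuvwxyz"
--
-- _NEIGHBORS = {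
--     "right": {
--         "even": "bc01fg45238967deuvhjyznpkmstqrwx",
--         "odd": "p0r21436x8zb9dcf5h7kjnmqesgutwvy",
--     },
--     "left": {
--         "even": "238967debc01fg45kmstqrwxuvhjyznp",
--         "odd": "14365h7k9dcfesgujnmqp0r2twvyx8zb",
--     },
--     "top": {
--         "even": "p0r21436x8zb9dcf5h7kjnmqesgutwvy",
--         "odd": "bc01fg45238967deuvhjyznpkmstqrwx",
--     },
--     "bottom": {
--         "even": "14365h7k9dcfesgujnmqp0r2twvyx8zb",
--         "odd": "238967debc01fg45kmstqrwxuvhjyznp",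
--     },
-- }
--
-- _BORDERS = {
--     "right": {"even": "bcfguvyz", "odd": "prxz"},
--     "left": {"even": "0145hjnp", "odd": "028b"},
--     "top": {"even": "prxz", "odd": "bcfguvyz"},
--     "bottom": {"even": "028b", "odd": "0145hjnp"},
-- }
--
-- def _adjacent(geohash: str, direction: str) -> str:
--     # Iterative: walk from the last character toward the front, keeping the
--     # parity of the current effective length and prepending replacement chars.
--     if not geohash:
--         return ""
--     g = geohash.lower()
--     i = len(g)
--     even = (i % 2 == 0)
--     repl = ""
--     while True:
--         t = "even" if even else "odd"
--         c = g[i - 1]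
--         idx = _NEIGHBORS[direction][t].find(c)
--         if idx < 0:
--             return repl
--         repl = _BASE32[idx] + repl
--         if c in _BORDERS[direction][t] and i - 1 > 0:
--             i -= 1
--             even = not even
--         else:
--             return g[: i - 1] + repl
--
-- def geohash_neighbors_8(cell: str) -> List[str]:
--     cell = (cell or "").lower()
--     if not cell:
--         return []
--
--     top = _adjacent(cell, "top")
--     bottom = _adjacent(cell, "bottom")
--     right = _adjacent(cell, "right")
--     left = _adjacent(cell, "left")
--
--     candidates = [
--         cell,
--         top,
--         bottom,
--         right,
--         left,
--         _adjacent(top, "right") if top else "",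
--         _adjacent(top, "left") if top else "",
--         _adjacent(bottom, "right") if bottom else "",
--         _adjacent(bottom, "left") if bottom else "",
--     ]
--
--     n = len(cell)
--     return list(dict.fromkeys(c for c in candidates if c and len(c) == n))
-- ===== Notes on version B (the rewrite author's own statement) =====
-- stated objective: alternative
-- what changed: The recursive _adjacent is replaced by an iterative back-to-front walk over the geohash with an explicit parity flag and a prepend accumulator (stopping when a non-border char or the front is reached), and the outer seen-set loop is replaced by filter + ordered dict.fromkeys dedup.
import Mathlib
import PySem

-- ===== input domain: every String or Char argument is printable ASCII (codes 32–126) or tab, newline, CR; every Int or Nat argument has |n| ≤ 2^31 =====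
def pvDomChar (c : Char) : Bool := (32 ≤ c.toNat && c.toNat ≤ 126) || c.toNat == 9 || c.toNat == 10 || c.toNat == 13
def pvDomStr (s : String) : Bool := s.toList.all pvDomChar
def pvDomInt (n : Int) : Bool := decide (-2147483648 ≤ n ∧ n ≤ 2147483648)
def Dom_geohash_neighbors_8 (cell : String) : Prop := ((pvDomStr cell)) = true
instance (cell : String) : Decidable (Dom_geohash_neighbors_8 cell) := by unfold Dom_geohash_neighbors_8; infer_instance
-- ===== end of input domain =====

-- B re-implements the recursive `_adjacent` as an iterative back-to-front walk with a
-- parity flag and an accumulator, and the outer dedup loop as filter + ordered dedup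
-- (objective: alternative decomposition, same cost).

-- ===== PORT A =====
-- shared table constants (_BASE32, _NEIGHBORS, _BORDERS); both Pythons declare the same
-- literals.  The dict lookups _NEIGHBORS[d][t] / _BORDERS[d][t] are ported as total
-- functions with an unreachable [] default: every call site passes one of the four
-- direction literals and "even"/"odd", so the Python KeyError path never runs (exact there).
def pvBase32 : List Char := "0123456789bcdefghjkmnpqrstuvwxyz".toList

def pvNeighbors (direction t : String) : List Char :=
  if direction = "right" then (if t = "even" then "bc01fg45238967deuvhjyznpkmstqrwx" else "p0r21436x8zb9dcf5h7kjnmqesgutwvy").toList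
  else if direction = "left" then (if t = "even" then "238967debc01fg45kmstqrwxuvhjyznp" else "14365h7k9dcfesgujnmqp0r2twvyx8zb").toList
  else if direction = "top" then (if t = "even" then "p0r21436x8zb9dcf5h7kjnmqesgutwvy" else "bc01fg45238967deuvhjyznpkmstqrwx").toList
  else if direction = "bottom" then (if t = "even" then "14365h7k9dcfesgujnmqp0r2twvyx8zb" else "238967debc01fg45kmstqrwxuvhjyznp").toList
  else []

def pvBorders (direction t : String) : List Char :=
  if direction = "right" then (if t = "even" then "bcfguvyz" else "prxz").toList
  else if direction = "left" then (if t = "even" then "0145hjnp" else "028b").toList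
  else if direction = "top" then (if t = "even" then "prxz" else "bcfguvyz").toList
  else if direction = "bottom" then (if t = "even" then "028b" else "0145hjnp").toList
  else []

-- A's recursive _adjacent, on List Char (geohash[-1] on a nonempty string = getLastD;
-- _BASE32[idx] with 0 ≤ idx < 32 = pyGetD, exact in range)
def pvAdjA (g : List Char) (direction : String) : List Char :=
  if g.length = 0 then []
  else
    let gl := PySem.Chars.lower g
    let last := gl.getLastD ' '
    let parent := gl.dropLast
    let t := if gl.length % 2 == 0 then "even" else "odd"
    let parent' := if PySem.Chars.isIn [last] (pvBorders direction t) && !parent.isEmpty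
                   then pvAdjA parent direction else parent
    let idx := PySem.Chars.find (pvNeighbors direction t) [last]
    if idx < 0 then [] else parent' ++ [PySem.List.pyGetD pvBase32 idx ' ']
termination_by g.length
decreasing_by simp [PySem.Chars.lower]; omega

def geohash_neighbors_8 (cell : String) : List String :=
  let cl := PySem.Chars.lower cell.toList
  if cl.isEmpty then []
  else
    let top := pvAdjA cl "top"
    let bottom := pvAdjA cl "bottom"
    let right := pvAdjA cl "right"
    let left := pvAdjA cl "left"
    let candidates : List (List Char) :=
      [cl, top, bottom, right, left,
       if !top.isEmpty then pvAdjA top "right" else [],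
       if !top.isEmpty then pvAdjA top "left" else [],
       if !bottom.isEmpty then pvAdjA bottom "right" else [],
       if !bottom.isEmpty then pvAdjA bottom "left" else []]
    (candidates.foldl
      (fun (st : PySem.Set (List Char) × List (List Char)) c =>
        if (!c.isEmpty && c.length == cl.length) && !(PySem.Set.contains st.1 c)
        then (PySem.Set.add st.1 c, st.2 ++ [c]) else st)
      (PySem.Set.empty, [])).2.map String.ofList

-- ===== PORT B =====
-- B's while-loop: walk the reversed geohash, flipping the parity flag, prepending
-- replacement chars to `repl`; the [] case of the match is unreachable (the loop only
-- continues while a prefix remains).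
def pvAdjLoop (direction : String) : List Char → Bool → List Char → List Char
  | [], _, repl => repl
  | c :: rest, evenP, repl =>
    let t := if evenP then "even" else "odd"
    let idx := PySem.Chars.find (pvNeighbors direction t) [c]
    if idx < 0 then repl
    else
      let repl' := PySem.List.pyGetD pvBase32 idx ' ' :: repl
      if PySem.Chars.isIn [c] (pvBorders direction t) && !rest.isEmpty
      then pvAdjLoop direction rest (!evenP) repl'
      else rest.reverse ++ repl'

def pvAdjB (g : List Char) (direction : String) : List Char :=
  if g.isEmpty then []
  else
    let gl := PySem.Chars.lower g
    pvAdjLoop direction gl.reverse (gl.length % 2 == 0) []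

def geohash_neighbors_8_alt (cell : String) : List String :=
  let cl := PySem.Chars.lower cell.toList
  if cl.isEmpty then []
  else
    let top := pvAdjB cl "top"
    let bottom := pvAdjB cl "bottom"
    let right := pvAdjB cl "right"
    let left := pvAdjB cl "left"
    let candidates : List (List Char) :=
      [cl, top, bottom, right, left,
       if !top.isEmpty then pvAdjB top "right" else [],
       if !top.isEmpty then pvAdjB top "left" else [],
       if !bottom.isEmpty then pvAdjB bottom "right" else [],
       if !bottom.isEmpty then pvAdjB bottom "left" else []]
    (PySem.List.dedup (candidates.filter
      (fun c => !c.isEmpty && c.length == cl.length))).map String.ofList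

-- ===== PRECONDITION & SPEC =====
def Spec_geohash_neighbors_8 (cell : String) (out : List String) : Prop := out = geohash_neighbors_8_alt cell
instance (cell : String) (out : List String) : Decidable (Spec_geohash_neighbors_8 cell out) := by unfold Spec_geohash_neighbors_8; infer_instance

-- ===== CLAIM (what is proved, stated in full; the proofs are below) =====
def Claim_equal_geohash_neighbors_8 : Prop := ∀ (cell : String), Dom_geohash_neighbors_8 cell → Spec_geohash_neighbors_8 cell (geohash_neighbors_8 cell)

-- ===== LEMMAS AND PROOFS =====

theorem pv_lowerChar_idem (c : Char) :
    PySem.Chars.lowerChar (PySem.Chars.lowerChar c) = PySem.Chars.lowerChar c := by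
  unfold PySem.Chars.lowerChar PySem.Chars.isupper
  split_ifs with h1 h2 <;> try rfl
  exfalso
  simp only [Bool.and_eq_true, decide_eq_true_eq, Char.le_def, UInt32.le_iff_toNat_le] at h1 h2
  have hz : ('Z').val.toNat = 90 := by decide
  have hA : ('A').val.toNat = 65 := by decide
  have h90 : c.toNat ≤ 90 := by have h := h1.2; rw [hz] at h; exact h
  have h65 : 65 ≤ c.toNat := by have h := h1.1; rw [hA] at h; exact h
  have hv : ((c.toNat + 32)).isValidChar := by unfold Nat.isValidChar; left; omega
  have he : (Char.ofNat (c.toNat + 32)).toNat = c.toNat + 32 := by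
    rw [Char.toNat_ofNat, if_pos hv]
  have h2' : (Char.ofNat (c.toNat + 32)).toNat ≤ 90 := by have h := h2.2; rw [hz] at h; exact h
  rw [he] at h2'
  omega

theorem pv_lower_idem (g : List Char) :
    PySem.Chars.lower (PySem.Chars.lower g) = PySem.Chars.lower g := by
  simp [PySem.Chars.lower, List.map_map, Function.comp_def, pv_lowerChar_idem]

theorem pv_parity_flip (n : Nat) : ((n + 1) % 2 == 0) = !(n % 2 == 0) := by
  rcases Nat.mod_two_eq_zero_or_one n with h | h <;> simp [Nat.add_mod, h]

-- one unfolding of A's recursion, on a geohash split as prefix ++ last char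
theorem pvAdjA_concat (d : String) (pre : List Char) (c : Char)
    (h : PySem.Chars.lower (pre ++ [c]) = pre ++ [c]) :
    pvAdjA (pre ++ [c]) d =
      (let t := if (pre.length + 1) % 2 == 0 then "even" else "odd"
       let parent' := if PySem.Chars.isIn [c] (pvBorders d t) && !pre.isEmpty
                      then pvAdjA pre d else pre
       let idx := PySem.Chars.find (pvNeighbors d t) [c]
       if idx < 0 then [] else parent' ++ [PySem.List.pyGetD pvBase32 idx ' ']) := by
  rw [pvAdjA]
  simp only [h, List.length_append, List.length_cons, List.length_nil, List.getLastD_concat,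
    List.dropLast_concat, Nat.zero_add]
  simp

-- core loop invariant: B's iterative walk over the reversed (lowered) geohash computes
-- A's recursion, with the accumulator appended
theorem pvAdjLoop_eq (d : String) : ∀ (r acc : List Char), r ≠ [] →
    PySem.Chars.lower r.reverse = r.reverse →
    pvAdjLoop d r (r.length % 2 == 0) acc = pvAdjA r.reverse d ++ acc := by
  intro r
  induction r with
  | nil => intro acc h _; exact absurd rfl h
  | cons c rest ih =>
    intro acc _ hlow
    rw [List.reverse_cons] at hlow ⊢
    have hpre : PySem.Chars.lower rest.reverse = rest.reverse ∧ PySem.Chars.lowerChar c = c := by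
      rw [PySem.Chars.lower, List.map_append] at hlow
      have := List.append_inj hlow (by simp)
      simpa [PySem.Chars.lower] using this
    rw [pvAdjA_concat d _ _ hlow, pvAdjLoop]
    simp only [List.length_reverse, List.length_cons, List.isEmpty_reverse]
    rw [show (!((rest.length + 1) % 2 == 0)) = (rest.length % 2 == 0) from by
      rw [pv_parity_flip, Bool.not_not]]
    rcases Nat.mod_two_eq_zero_or_one (rest.length + 1) with hE | hE <;>
      simp only [hE, Nat.reduceBEq, Bool.false_eq_true, if_false, if_true] <;>
      · split_ifs with h1 h2
        · simp
        · have hne : rest ≠ [] := by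
            rcases Bool.and_eq_true_iff.mp h2 with ⟨_, hx⟩
            simpa using hx
          rw [ih _ hne hpre.1]
          simp
        · simp

-- A re-lowers an already-lowered argument; that is a no-op
theorem pvAdjA_lower (g : List Char) (d : String) :
    pvAdjA (PySem.Chars.lower g) d = pvAdjA g d := by
  rw [pvAdjA, pvAdjA]
  simp [PySem.Chars.lower, List.map_map, Function.comp_def, pv_lowerChar_idem]

theorem pvAdjB_eq (g : List Char) (d : String) : pvAdjB g d = pvAdjA g d := by
  by_cases hg : g.isEmpty
  · rw [pvAdjB, if_pos hg, pvAdjA]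
    simp [List.isEmpty_iff.mp hg]
  · have hne : (PySem.Chars.lower g).reverse ≠ [] := by
      simp [PySem.Chars.lower]
      simpa [List.isEmpty_iff] using hg
    have hlow : PySem.Chars.lower ((PySem.Chars.lower g).reverse.reverse)
        = (PySem.Chars.lower g).reverse.reverse := by
      rw [List.reverse_reverse, pv_lower_idem]
    have h1 := pvAdjLoop_eq d (PySem.Chars.lower g).reverse [] hne hlow
    rw [List.reverse_reverse] at h1
    rw [pvAdjB, if_neg hg]
    show pvAdjLoop d (PySem.Chars.lower g).reverse
        ((PySem.Chars.lower g).length % 2 == 0) [] = pvAdjA g d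
    rw [show ((PySem.Chars.lower g).length % 2 == 0)
        = ((PySem.Chars.lower g).reverse.length % 2 == 0) by simp]
    rw [h1, List.append_nil, pvAdjA_lower]

-- A's seen/out loop over any list is the ordered foldl-add (= first-occurrence dedup)
-- of the filtered list, in both components
theorem pv_foldl_seen (p : List Char → Bool) : ∀ (xs : List (List Char)) (a : List (List Char)),
    (xs.foldl
      (fun (st : PySem.Set (List Char) × List (List Char)) c =>
        if p c && !(PySem.Set.contains st.1 c)
        then (PySem.Set.add st.1 c, st.2 ++ [c]) else st)
      (a, a))
    = ((xs.filter p).foldl PySem.Set.add a, (xs.filter p).foldl PySem.Set.add a) := by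
  intro xs
  induction xs with
  | nil => intro a; simp
  | cons c xs ih =>
    intro a
    rw [List.foldl_cons, List.filter_cons]
    by_cases hp : p c
    · rw [if_pos hp, List.foldl_cons]
      by_cases hc : PySem.Set.contains a c
      · have hadd : PySem.Set.add a c = a := by
          simp [PySem.Set.add]; simpa [PySem.Set.contains] using hc
        simp only [hp, hc, Bool.not_true, Bool.and_false, Bool.false_eq_true, if_false, hadd]
        exact ih a
      · have hadd : PySem.Set.add a c = a ++ [c] := by
          simp [PySem.Set.add]; simpa [PySem.Set.contains] using hc
        simp only [hp, hc, Bool.not_false, Bool.and_true, if_true, hadd]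
        exact ih (a ++ [c])
    · simp only [hp, Bool.false_and, Bool.false_eq_true, if_false]
      exact ih a

theorem pv_main_eq (cell : String) : geohash_neighbors_8 cell = geohash_neighbors_8_alt cell := by
  simp only [geohash_neighbors_8, geohash_neighbors_8_alt, pvAdjB_eq]
  by_cases h : (PySem.Chars.lower cell.toList).isEmpty
  · rw [if_pos h, if_pos h]
  · rw [if_neg h, if_neg h]
    rw [show (PySem.Set.empty : PySem.Set (List Char)) = ([] : List (List Char)) from rfl]
    rw [pv_foldl_seen (fun c => !c.isEmpty && c.length == (PySem.Chars.lower cell.toList).length)]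
    rw [PySem.List.dedup_eq_ofList, PySem.Set.ofList_eq_foldl]

-- ===== VERDICT (by name: the statement is the Claim_ definition above) =====
theorem geohash_neighbors_8_spec : Claim_equal_geohash_neighbors_8 := by
  intro cell _
  unfold Spec_geohash_neighbors_8
  exact pv_main_eq cell
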